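-- pv_equiv track=rewrite | github.com/GeomMotif/GeomMotif | construction/find_substructures.py | convert_to_intervals
-- ===== SOURCE A (Python) =====
-- def convert_to_intervals(residue_str, chain_id, total_residues):
--     """Convert a string of residue IDs to interval notation with chain IDs, including gap lengths and fragment lengths."""
--     if not residue_str:
--         return "", 0
--
--     residues = [int(x) for x in residue_str.split('_')]
--     if not residues:
--         return "", 0
--
--     result_parts = []
--     current_interval = [residues[0]]
--
--     # Add length before first fragment (distance from sequence start) only if non-zero
--     prefix_len = residues[0] - 1
--     if prefix_len > 0:
--         result_parts.append(str(prefix_len))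
--
--     for i in range(1, len(residues)):
--         if residues[i] == residues[i-1] + 1:
--             current_interval.append(residues[i])
--         else:
--             # Add current interval with its length
--             if len(current_interval) > 1:
--                 result_parts.append(f"{chain_id}{current_interval[0]}-{current_interval[-1]}")
--             else:
--                 result_parts.append(f"{chain_id}{current_interval[0]}")
--
--             # Add gap length
--             gap = residues[i] - residues[i-1] - 1
--             result_parts.append(str(gap))
--
--             current_interval = [residues[i]]
--
--     # Handle the last interval with its length
--     if len(current_interval) > 1:
--         result_parts.append(f"{chain_id}{current_interval[0]}-{current_interval[-1]}")
--     else: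
--         result_parts.append(f"{chain_id}{current_interval[0]}")
--
--     # Add length after last fragment (distance to sequence end) only if non-zero
--     suffix_len = total_residues - residues[-1]
--     if suffix_len > 0:
--         result_parts.append(str(suffix_len))
--
--     # Calculate total sequence span (including prefix and suffix)
--     total_span = residues[-1] - residues[0] + 1 + prefix_len + suffix_len
--
--     return '/'.join(result_parts), total_span
-- ===== SOURCE B (Python) =====
-- def convert_to_intervals(residue_str, chain_id, total_residues):
--     """Two-pass version: build maximal consecutive runs first, then render runs with gaps."""
--     if not residue_str:
--         return "", 0
--     residues = [int(x) for x in residue_str.split('_')]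
--     # pass 1: maximal consecutive runs as (start, end) pairs
--     runs = []
--     start = prev = residues[0]
--     for r in residues[1:]:
--         if r != prev + 1:
--             runs.append((start, prev))
--             start = r
--         prev = r
--     runs.append((start, prev))
--     # pass 2: render runs, with the gap length between consecutive runs
--     parts = []
--     if residues[0] - 1 > 0:
--         parts.append(str(residues[0] - 1))
--     parts.extend(_render(runs, chain_id))
--     if total_residues - residues[-1] > 0:
--         parts.append(str(total_residues - residues[-1]))
--     return '/'.join(parts), total_residues
--
--
-- def _render(runs, chain_id):
--     if not runs:
--         return []
--     s, e = runs[0]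
--     part = f"{chain_id}{s}-{e}" if s < e else f"{chain_id}{s}"
--     if len(runs) == 1:
--         return [part]
--     return [part, str(runs[1][0] - e - 1)] + _render(runs[1:], chain_id)
-- ===== Notes on version B (the rewrite author's own statement) =====
-- stated objective: alternative
-- what changed: A merges grouping and formatting in one index loop over a growing current_interval list; B first builds the list of maximal consecutive (start,end) runs, then renders runs and inter-run gaps in a second pass, and returns total_residues directly as the span (A's span arithmetic always simplifies to it).
import Mathlib
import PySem

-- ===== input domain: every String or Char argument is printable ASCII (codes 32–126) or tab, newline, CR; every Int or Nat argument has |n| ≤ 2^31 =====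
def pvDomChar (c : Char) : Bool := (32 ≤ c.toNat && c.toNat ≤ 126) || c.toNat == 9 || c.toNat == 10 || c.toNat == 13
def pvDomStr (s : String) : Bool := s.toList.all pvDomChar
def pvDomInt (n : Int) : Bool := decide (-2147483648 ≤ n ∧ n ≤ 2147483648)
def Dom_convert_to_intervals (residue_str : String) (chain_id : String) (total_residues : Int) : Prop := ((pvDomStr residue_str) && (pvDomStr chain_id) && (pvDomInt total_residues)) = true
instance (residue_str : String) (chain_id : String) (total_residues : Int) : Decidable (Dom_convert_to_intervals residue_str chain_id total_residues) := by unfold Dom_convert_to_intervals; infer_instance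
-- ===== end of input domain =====

-- B replaces A's single index loop over a growing interval list by a run-list pass plus a rendering pass (alternative decomposition, same behaviour).

-- ===== PORT A =====
-- f"{chain_id}{cur[0]}-{cur[-1]}" / f"{chain_id}{cur[0]}" guarded by len(cur) > 1
def aFmt (chain_id : String) (cur : List Int) : String :=
  if 1 < cur.length then
    chain_id ++ PySem.Int.toStr (PySem.List.pyGetD cur 0 0) ++ "-" ++ PySem.Int.toStr (PySem.List.pyGetD cur (-1) 0)
  else
    chain_id ++ PySem.Int.toStr (PySem.List.pyGetD cur 0 0)

-- the 'for i in range(1, len(residues))' loop: prev = residues[i-1], r = residues[i]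
def aLoop (chain_id : String) (parts : List String) (cur : List Int) (prev : Int) : List Int → List String × List Int
  | [] => (parts, cur)
  | r :: rest =>
    if r = prev + 1 then
      aLoop chain_id parts (cur ++ [r]) r rest
    else
      aLoop chain_id (parts ++ [aFmt chain_id cur, PySem.Int.toStr (r - prev - 1)]) [r] r rest

def convert_to_intervals (residue_str : String) (chain_id : String) (total_residues : Int) : String × Int :=
  if residue_str = "" then ("", 0)
  else
    -- residues = [int(x) for x in residue_str.split('_')]; Pre_ guarantees every chunk parses, so getD 0 is never taken
    match (PySem.Chars.splitOn residue_str.toList ['_']).map (fun x => (PySem.Int.ofChars? x).getD 0) with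
    | [] => ("", 0)
    | r0 :: rest =>
      let prefix_len := r0 - 1
      let parts0 := if prefix_len > 0 then [PySem.Int.toStr prefix_len] else []
      let pc := aLoop chain_id parts0 [r0] r0 rest
      let parts1 := pc.1 ++ [aFmt chain_id pc.2]
      let last := PySem.List.pyGetD (r0 :: rest) (-1) 0   -- residues[-1]
      let suffix_len := total_residues - last
      let parts2 := if suffix_len > 0 then parts1 ++ [PySem.Int.toStr suffix_len] else parts1
      (PySem.Str.join "/" parts2, last - r0 + 1 + prefix_len + suffix_len)

-- ===== PORT B =====
-- pass 1 of Source B: maximal consecutive runs as (start, end) pairs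
def bRuns (start prev : Int) : List Int → List (Int × Int)
  | [] => [(start, prev)]
  | r :: rest =>
    if r ≠ prev + 1 then (start, prev) :: bRuns r r rest
    else bRuns start r rest

-- _render of Source B: each run, with the gap length before the next run
def bRender (chain_id : String) : List (Int × Int) → List String
  | [] => []
  | (s, e) :: rest =>
    let part := if s < e then chain_id ++ PySem.Int.toStr s ++ "-" ++ PySem.Int.toStr e
                else chain_id ++ PySem.Int.toStr s
    match rest with
    | [] => [part]
    | (s2, _) :: _ => part :: PySem.Int.toStr (s2 - e - 1) :: bRender chain_id rest

def convert_to_intervals_alt (residue_str : String) (chain_id : String) (total_residues : Int) : String × Int :=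
  if residue_str = "" then ("", 0)
  else
    match (PySem.Chars.splitOn residue_str.toList ['_']).map (fun x => (PySem.Int.ofChars? x).getD 0) with
    | [] => ("", 0)  -- unreachable: splitting a nonempty string is nonempty
    | r0 :: rest =>
      let runs := bRuns r0 r0 rest
      let pre := if r0 - 1 > 0 then [PySem.Int.toStr (r0 - 1)] else []
      let last := PySem.List.pyGetD (r0 :: rest) (-1) 0   -- residues[-1]
      let suf := total_residues - last
      let parts := pre ++ bRender chain_id runs ++ (if suf > 0 then [PySem.Int.toStr suf] else [])
      (PySem.Str.join "/" parts, total_residues)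

-- ===== PRECONDITION & SPEC =====
-- Pre_ excludes exactly the inputs where Python's int(x) raises ValueError on some '_'-separated chunk.
def Pre_convert_to_intervals (residue_str : String) (chain_id : String) (total_residues : Int) : Prop :=
  residue_str = "" ∨ ((PySem.Chars.splitOn residue_str.toList ['_']).all (fun x => (PySem.Int.ofChars? x).isSome)) = true
instance (residue_str : String) (chain_id : String) (total_residues : Int) : Decidable (Pre_convert_to_intervals residue_str chain_id total_residues) := by unfold Pre_convert_to_intervals; infer_instance

def pvWitness_convert_to_intervals : String × String × Int := ("2_3_4_8_10", "A", 12)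

def Spec_convert_to_intervals (residue_str : String) (chain_id : String) (total_residues : Int) (out : String × Int) : Prop := out = convert_to_intervals_alt residue_str chain_id total_residues
instance (residue_str : String) (chain_id : String) (total_residues : Int) (out : String × Int) : Decidable (Spec_convert_to_intervals residue_str chain_id total_residues out) := by unfold Spec_convert_to_intervals; infer_instance

-- ===== CLAIM (what is proved, stated in full; the proofs are below) =====
def Claim_equal_convert_to_intervals : Prop := ∀ (residue_str : String) (chain_id : String) (total_residues : Int), Dom_convert_to_intervals residue_str chain_id total_residues → Pre_convert_to_intervals residue_str chain_id total_residues → Spec_convert_to_intervals residue_str chain_id total_residues (convert_to_intervals residue_str chain_id total_residues)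

-- ===== LEMMAS AND PROOFS =====

lemma bRuns_ne_nil (start prev : Int) (rest : List Int) : bRuns start prev rest ≠ [] := by
  induction rest generalizing start prev with
  | nil => simp [bRuns]
  | cons r rest ih =>
    simp only [bRuns]
    split
    · simp
    · exact ih start r

lemma bRuns_head_fst (start prev : Int) (rest : List Int) :
    (bRuns start prev rest).head?.map Prod.fst = some start := by
  induction rest generalizing start prev with
  | nil => simp [bRuns]
  | cons r rest ih =>
    simp only [bRuns]
    split
    · simp
    · exact ih start r

lemma loop_render (chain_id : String) (rest : List Int) :
    ∀ (parts : List String) (cur : List Int) (s p : Int),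
      cur ≠ [] →
      PySem.List.pyGetD cur 0 0 = s →
      PySem.List.pyGetD cur (-1) 0 = p →
      s ≤ p →
      (1 < cur.length ↔ s < p) →
      (aLoop chain_id parts cur p rest).1 ++ [aFmt chain_id (aLoop chain_id parts cur p rest).2]
        = parts ++ bRender chain_id (bRuns s p rest) := by
  induction rest with
  | nil =>
    intro parts cur s p hne h0 hlast hsp hlen
    simp [aLoop, bRuns, bRender, aFmt, h0, hlast, hlen]
  | cons r rest ih =>
    intro parts cur s p hne h0 hlast hsp hlen
    by_cases hr : r = p + 1
    · -- continue the current run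
      simp only [aLoop, bRuns, hr, ne_eq, not_true_eq_false, reduceIte]
      obtain ⟨c, cs, rfl⟩ : ∃ c cs, cur = c :: cs := by
        cases cur with
        | nil => exact absurd rfl hne
        | cons c cs => exact ⟨c, cs, rfl⟩
      have h0' : PySem.List.pyGetD ((c :: cs) ++ [p + 1]) 0 0 = s := by
        rw [List.cons_append, PySem.List.pyGetD_zero_cons]
        rw [PySem.List.pyGetD_zero_cons] at h0
        exact h0
      have hlast' : PySem.List.pyGetD ((c :: cs) ++ [p + 1]) (-1) 0 = p + 1 :=
        PySem.List.pyGetD_neg_one_append_singleton _ _ _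
      have hlen' : 1 < ((c :: cs) ++ [p + 1]).length ↔ s < p + 1 := by
        simp only [List.length_append, List.length_cons]
        omega
      exact ih parts ((c :: cs) ++ [p + 1]) s (p + 1) (by simp) h0' hlast' (by omega) hlen'
    · -- close the run, start a new one at r
      simp only [aLoop, bRuns, ne_eq, hr, not_false_eq_true, reduceIte]
      have step := ih (parts ++ [aFmt chain_id cur, PySem.Int.toStr (r - p - 1)]) [r] r r
        (by simp) (by rw [PySem.List.pyGetD_zero_cons]) (by simp [PySem.List.pyGetD_neg_one])
        le_rfl (by simp)
      rw [step]
      -- unfold one step of bRender on the cons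
      obtain ⟨⟨s2, e2⟩, rs, hruns⟩ : ∃ q rs, bRuns r r rest = q :: rs := by
        cases h : bRuns r r rest with
        | nil => exact absurd h (bRuns_ne_nil r r rest)
        | cons q rs => exact ⟨q, rs, rfl⟩
      have hs2 : s2 = r := by
        have := bRuns_head_fst r r rest
        rw [hruns] at this
        have h2 : (some s2 : Option Int) = some r := by simpa using this
        exact Option.some.inj h2
      subst hs2
      rw [hruns]
      have hfmt : aFmt chain_id cur =
          (if s < p then chain_id ++ PySem.Int.toStr s ++ "-" ++ PySem.Int.toStr p
           else chain_id ++ PySem.Int.toStr s) := by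
        simp only [aFmt, h0, hlast, hlen]
      simp only [bRender, hfmt]
      simp

-- ===== VERDICT (by name: the statement is the Claim_ definition above) =====
theorem convert_to_intervals_spec : Claim_equal_convert_to_intervals := by
  unfold Claim_equal_convert_to_intervals Spec_convert_to_intervals
  intro residue_str chain_id total_residues _ _
  unfold convert_to_intervals convert_to_intervals_alt
  by_cases hs : residue_str = ""
  · simp [hs]
  · simp only [if_neg hs]
    cases hres : (PySem.Chars.splitOn residue_str.toList ['_']).map (fun x => (PySem.Int.ofChars? x).getD 0) with
    | nil => rfl
    | cons r0 rest =>
      have hloop := loop_render chain_id rest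
        (if r0 - 1 > 0 then [PySem.Int.toStr (r0 - 1)] else []) [r0] r0 r0
        (by simp) (by rw [PySem.List.pyGetD_zero_cons])
        (by simp [PySem.List.pyGetD_neg_one]) le_rfl (by simp)
      simp only [hloop]
      refine Prod.ext ?_ ?_
      · simp only []
        congr 1
        split_ifs <;> simp
      · simp only []
        ring
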